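-- pv_equiv track=rewrite | github.com/vinmay/reachscan | src/reachscan/reachability.py | _find_class_run_method
-- ===== SOURCE A (Python) =====
-- from typing import Dict, List, Optional, Tuple
--
-- def _find_class_run_method(class_lineno: int, file_map: Dict[int, str]) -> Optional[str]:
--     """For a class-based entry point at class_lineno, find its _run/_arun/__call__ method.
--
--     Class definition lines are NOT recorded in lineno_index (only function/method
--     start lines are). This fallback scans forward from class_lineno and returns
--     the first method whose qualified name ends with ._run, ._arun, or .__call__.
--
--     Stops early if a bare name (top-level function) is encountered, which signals
--     that we've left the class body.
--     """
--     _RUN_SUFFIXES = ("._run", "._arun", ".__call__")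
--     for lineno in sorted(k for k in file_map if k > class_lineno):
--         qual, _end = file_map[lineno]
--         if qual.endswith(_RUN_SUFFIXES):
--             return qual
--         # A bare name (no dot) means a new top-level function — we've exited the class
--         if "." not in qual:
--             break
--     return None
-- ===== SOURCE B (Python) =====
-- from typing import Dict, List, Optional, Tuple
--
-- def _find_class_run_method(class_lineno: int, file_map: Dict[int, str]) -> Optional[str]:
--     """No sorting: compute the class-body boundary (smallest bare-name lineno
--     after class_lineno) with one min, then take the earliest run-suffixed
--     method before that boundary with another min."""
--     _RUN_SUFFIXES = ("._run", "._arun", ".__call__")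
--     bares = [lineno for lineno, (qual, _end) in file_map.items()
--              if lineno > class_lineno and "." not in qual]
--     boundary = min(bares) if bares else None
--     cands = [(lineno, qual) for lineno, (qual, _end) in file_map.items()
--              if lineno > class_lineno and (boundary is None or lineno < boundary)
--              and qual.endswith(_RUN_SUFFIXES)]
--     return min(cands, key=lambda p: p[0])[1] if cands else None
-- ===== Notes on version B (the rewrite author's own statement) =====
-- stated objective: alternative
-- what changed: A sorts all keys after class_lineno and scans them in order, breaking at the first bare (dotless) name; B never sorts: it computes the class-body boundary as the minimum bare-name lineno in one comprehension+min pass and then picks the run-suffixed candidate with the minimum lineno below that boundary in a second.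
import Mathlib
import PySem

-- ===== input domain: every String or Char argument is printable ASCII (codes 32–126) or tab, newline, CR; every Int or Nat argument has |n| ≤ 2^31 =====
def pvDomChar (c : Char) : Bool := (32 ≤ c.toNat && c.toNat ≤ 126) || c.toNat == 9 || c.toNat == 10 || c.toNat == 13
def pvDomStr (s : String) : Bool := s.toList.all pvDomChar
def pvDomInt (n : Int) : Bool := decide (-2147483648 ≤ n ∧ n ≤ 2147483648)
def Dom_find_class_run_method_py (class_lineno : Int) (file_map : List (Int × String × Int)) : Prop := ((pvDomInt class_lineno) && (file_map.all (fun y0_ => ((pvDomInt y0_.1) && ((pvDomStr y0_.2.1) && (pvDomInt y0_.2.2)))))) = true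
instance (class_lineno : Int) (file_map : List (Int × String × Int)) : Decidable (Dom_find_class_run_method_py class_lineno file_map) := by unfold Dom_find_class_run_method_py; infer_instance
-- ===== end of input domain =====

-- B replaces A's sort-then-scan-with-break by two comprehension+min passes (boundary
-- first, then earliest run-suffixed method before it); objective: alternative, no sort.

-- ===== PORT A =====
-- qual.endswith(("._run", "._arun", ".__call__"))
def pvRunSuffix (q : String) : Bool :=
  PySem.Str.endswith q "._run" || PySem.Str.endswith q "._arun" || PySem.Str.endswith q ".__call__"

-- A's for-loop over the sorted filtered keys; dict lookup = first match
-- (the `none` lookup branch is Python's KeyError, unreachable: k is drawn from file_map's keys)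
def pvALoop (file_map : List (Int × String × Int)) : List Int → Option String
  | [] => none
  | k :: ks =>
    match file_map.find? (fun e => e.1 == k) with
    | none => none
    | some e =>
      if pvRunSuffix e.2.1 then some e.2.1
      else if PySem.Str.isIn "." e.2.1 then pvALoop file_map ks
      else none

def find_class_run_method_py (class_lineno : Int) (file_map : List (Int × String × Int)) : Option String :=
  pvALoop file_map
    (PySem.List.sorted ((file_map.map Prod.fst).filter (fun k => decide (class_lineno < k))) id)

-- ===== PORT B =====
-- bares = [lineno for lineno, (qual, _end) in file_map.items() if lineno > class_lineno and "." not in qual]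
def pvBares (class_lineno : Int) (file_map : List (Int × String × Int)) : List Int :=
  (file_map.filter (fun e => decide (class_lineno < e.1) && !PySem.Str.isIn "." e.2.1)).map Prod.fst

-- boundary = min(bares) if bares else None
def pvBoundary (class_lineno : Int) (file_map : List (Int × String × Int)) : Option Int :=
  PySem.List.min? (pvBares class_lineno file_map) id

-- cands = [(lineno, qual) for ... if lineno > class_lineno and (boundary is None or lineno < boundary) and qual.endswith(_RUN_SUFFIXES)]
def pvCands (class_lineno : Int) (file_map : List (Int × String × Int)) : List (Int × String) :=
  (file_map.filter (fun e =>
      decide (class_lineno < e.1) &&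
      (match pvBoundary class_lineno file_map with | none => true | some x => decide (e.1 < x)) &&
      pvRunSuffix e.2.1)).map (fun e => (e.1, e.2.1))

-- return min(cands, key=lambda p: p[0])[1] if cands else None
def find_class_run_method_py_alt (class_lineno : Int) (file_map : List (Int × String × Int)) : Option String :=
  (PySem.List.min? (pvCands class_lineno file_map) Prod.fst).map Prod.snd

-- ===== PRECONDITION & SPEC =====
-- Pre_ excludes association lists with duplicate keys: such a list does not represent
-- any Python dict (duplicate keys collapse on dict construction), so A's behaviour
-- there is defined by no Python run.
def Pre_find_class_run_method_py (_class_lineno : Int) (file_map : List (Int × String × Int)) : Prop :=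
  (file_map.map Prod.fst).Nodup
instance (class_lineno : Int) (file_map : List (Int × String × Int)) : Decidable (Pre_find_class_run_method_py class_lineno file_map) := by unfold Pre_find_class_run_method_py; infer_instance

def pvWitness_find_class_run_method_py : Int × (List (Int × String × Int)) :=
  (0, [(1, ("C._run", 2)), (5, ("g", 6))])

def Spec_find_class_run_method_py (class_lineno : Int) (file_map : List (Int × String × Int)) (out : Option String) : Prop := out = find_class_run_method_py_alt class_lineno file_map
instance (class_lineno : Int) (file_map : List (Int × String × Int)) (out : Option String) : Decidable (Spec_find_class_run_method_py class_lineno file_map out) := by unfold Spec_find_class_run_method_py; infer_instance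

-- ===== CLAIM (what is proved, stated in full; the proofs are below) =====
def Claim_equal_find_class_run_method_py : Prop := ∀ (class_lineno : Int) (file_map : List (Int × String × Int)), Dom_find_class_run_method_py class_lineno file_map → Pre_find_class_run_method_py class_lineno file_map → Spec_find_class_run_method_py class_lineno file_map (find_class_run_method_py class_lineno file_map)

-- ===== LEMMAS AND PROOFS =====

-- a run suffix contains a dot
lemma runSuffix_isIn_dot (q : String) (h : pvRunSuffix q = true) : PySem.Str.isIn "." q = true := by
  rw [PySem.Str.isIn_iff_infix]
  have hdot : '.' ∈ q.toList := by
    unfold pvRunSuffix at h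
    rcases Bool.or_eq_true_iff.1 h with h' | hc
    · rcases Bool.or_eq_true_iff.1 h' with hr | ha
      · have hs : ("._run").toList <:+ q.toList := by
          simpa [PySem.Str.endswith, PySem.Chars.endswith] using hr
        exact hs.subset (by decide)
      · have hs : ("._arun").toList <:+ q.toList := by
          simpa [PySem.Str.endswith, PySem.Chars.endswith] using ha
        exact hs.subset (by decide)
    · have hs : (".__call__").toList <:+ q.toList := by
        simpa [PySem.Str.endswith, PySem.Chars.endswith] using hc
      exact hs.subset (by decide)
  obtain ⟨s, t, hst⟩ := List.mem_iff_append.1 hdot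
  exact ⟨s, t, by simpa using hst.symm⟩

-- first-match lookup of an entry's own key, under nodup keys
lemma find?_self {fm : List (Int × String × Int)} (hnd : (fm.map Prod.fst).Nodup)
    {e : Int × String × Int} (he : e ∈ fm) : fm.find? (fun e' => e'.1 == e.1) = some e := by
  induction fm with
  | nil => cases he
  | cons a l ih =>
    rcases List.mem_cons.1 he with rfl | he'
    · simp
    · have hne : ¬ a.1 = e.1 := by
        intro hEq
        have : e.1 ∈ l.map Prod.fst := List.mem_map_of_mem he'
        rw [List.map_cons, List.nodup_cons] at hnd
        exact hnd.1 (hEq ▸ this)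
      simp only [List.find?_cons]
      have : (a.1 == e.1) = false := by simpa using hne
      rw [this]
      exact ih (by rw [List.map_cons, List.nodup_cons] at hnd; exact hnd.2) he'

-- entries with the same key coincide under nodup keys
lemma entry_unique {fm : List (Int × String × Int)} (hnd : (fm.map Prod.fst).Nodup)
    {e e' : Int × String × Int} (he : e ∈ fm) (he' : e' ∈ fm) (h : e.1 = e'.1) : e = e' := by
  have h1 := find?_self hnd he
  have h2 := find?_self hnd he'
  rw [← h] at h2
  rw [h1] at h2
  exact (Option.some_inj.1 h2)

-- a key of the map is the key of some entry
lemma exists_entry_of_mem_keys {fm : List (Int × String × Int)} {k : Int}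
    (hk : k ∈ fm.map Prod.fst) : ∃ e ∈ fm, e.1 = k := by
  simpa using hk

-- characterization of A's loop via find? on the key list
lemma aLoop_eq_find? (fm : List (Int × String × Int)) (l : List Int)
    (hl : ∀ k ∈ l, ∃ e, e ∈ fm ∧ fm.find? (fun e' => e'.1 == k) = some e) :
    pvALoop fm l =
      match l.find? (fun k =>
        match fm.find? (fun e' => e'.1 == k) with
        | none => false
        | some e => pvRunSuffix e.2.1 || ! PySem.Str.isIn "." e.2.1) with
      | none => none
      | some k =>
        match fm.find? (fun e' => e'.1 == k) with
        | none => none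
        | some e => if pvRunSuffix e.2.1 then some e.2.1 else none := by
  induction l with
  | nil => rfl
  | cons k ks ih =>
    obtain ⟨e, _he, hfe⟩ := hl k (List.mem_cons_self)
    have ih' := ih (fun k' hk' => hl k' (List.mem_cons_of_mem _ hk'))
    rw [List.find?_cons]
    by_cases hg : pvRunSuffix e.2.1 = true
    · simp [pvALoop, hfe, hg]
    · by_cases hd : PySem.Chars.isIn ['.'] e.2.1.toList = true
      · simpa [pvALoop, PySem.Str.isIn, hfe, hg, hd] using ih'
      · simp [pvALoop, PySem.Str.isIn, hfe, hg, hd]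

theorem equal_main (c : Int) (fm : List (Int × String × Int))
    (hnd : (fm.map Prod.fst).Nodup) :
    find_class_run_method_py c fm = find_class_run_method_py_alt c fm := by
  unfold find_class_run_method_py find_class_run_method_py_alt
  have hperm : (PySem.List.sorted ((fm.map Prod.fst).filter (fun k => decide (c < k))) id).Perm
      ((fm.map Prod.fst).filter (fun k => decide (c < k))) :=
    PySem.List.sorted_perm _ _ _
  set ks := PySem.List.sorted ((fm.map Prod.fst).filter (fun k => decide (c < k))) id with hksdef
  have hmemks : ∀ k : Int, k ∈ ks ↔ (k ∈ fm.map Prod.fst ∧ c < k) := by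
    intro k
    rw [hperm.mem_iff, List.mem_filter]
    simp
  have hndks : ks.Nodup := hperm.nodup_iff.mpr (hnd.filter _)
  have hsorted : List.Pairwise (fun a b : Int => a < b) ks := by
    have hle : List.Pairwise (fun a b : Int => a ≤ b) ks := by
      simpa using PySem.List.sorted_pairwise ((fm.map Prod.fst).filter (fun k => decide (c < k))) id
    exact (List.Pairwise.and hle hndks).imp (fun h => lt_of_le_of_ne h.1 h.2)
  have hkeyks : ∀ e ∈ fm, c < e.1 → e.1 ∈ ks := by
    intro e he hc; exact (hmemks e.1).2 ⟨List.mem_map_of_mem he, hc⟩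
  have hlook : ∀ k ∈ ks, ∃ e, e ∈ fm ∧ fm.find? (fun e' => e'.1 == k) = some e ∧ e.1 = k := by
    intro k hk
    obtain ⟨hkk, _⟩ := (hmemks k).1 hk
    obtain ⟨e, he, hek⟩ := exists_entry_of_mem_keys hkk
    exact ⟨e, he, by rw [← hek]; exact find?_self hnd he, hek⟩
  rw [aLoop_eq_find? fm ks (fun k hk => ((hlook k hk).imp (fun e h => ⟨h.1, h.2.1⟩)))]
  cases hfind : ks.find? (fun k =>
      match fm.find? (fun e' => e'.1 == k) with
      | none => false
      | some e => pvRunSuffix e.2.1 || ! PySem.Str.isIn "." e.2.1) with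
  | none =>
    have hall : ∀ e ∈ fm, c < e.1 → (pvRunSuffix e.2.1 || ! PySem.Str.isIn "." e.2.1) = false := by
      intro e he hc
      have h1 := List.find?_eq_none.1 hfind e.1 (hkeyks e he hc)
      simpa [find?_self hnd he] using h1
    have hgoodfalse : ∀ e ∈ fm, c < e.1 → pvRunSuffix e.2.1 = false := by
      intro e he hc
      have := hall e he hc
      simp only [Bool.or_eq_false_iff] at this
      exact this.1
    have hcand : pvCands c fm = [] := by
      unfold pvCands
      have hfil : fm.filter (fun e =>
          decide (c < e.1) &&
          (match pvBoundary c fm with | none => true | some x => decide (e.1 < x)) &&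
          pvRunSuffix e.2.1) = [] := by
        rw [List.filter_eq_nil_iff]
        intro e he
        simp only [Bool.and_eq_true, decide_eq_true_eq, not_and]
        rintro ⟨hc, _⟩ hgood
        rw [hgoodfalse e he hc] at hgood
        cases hgood
      rw [hfil, List.map_nil]
    have hmn : PySem.List.min? (pvCands c fm) Prod.fst = none := by
      rw [hcand]
      exact (PySem.List.min?_eq_none_iff _ _).mpr rfl
    rw [hmn]
    rfl
  | some k =>
    obtain ⟨hPk, l₁, l₂, hkseq, hl₁⟩ := List.find?_eq_some_iff_append.1 hfind
    have hkks : k ∈ ks := by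
      rw [hkseq]; exact List.mem_append_right _ List.mem_cons_self
    obtain ⟨e₀, he₀, hfe₀, hek₀⟩ := hlook k hkks
    have hck : c < k := ((hmemks k).1 hkks).2
    have hPk' : (pvRunSuffix e₀.2.1 || ! PySem.Str.isIn "." e₀.2.1) = true := by
      simpa [hfe₀] using hPk
    -- minimality of k among satisfying keys, at entry level
    have hminE : ∀ e ∈ fm, c < e.1 →
        (pvRunSuffix e.2.1 || ! PySem.Str.isIn "." e.2.1) = true → k ≤ e.1 := by
      intro e he hc hp
      by_contra hlt
      rw [not_le] at hlt
      have hk' : e.1 ∈ ks := hkeyks e he hc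
      rw [hkseq] at hk'
      rcases List.mem_append.1 hk' with h1 | h2
      · have hfail := hl₁ e.1 h1
        simp only [find?_self hnd he, Bool.not_eq_eq_eq_not, Bool.not_true] at hfail
        rw [hp] at hfail
        cases hfail
      · rcases List.mem_cons.1 h2 with hEq | h3
        · rw [hEq] at hlt; exact lt_irrefl _ hlt
        · rw [hkseq] at hsorted
          have hp2 := (List.pairwise_append.1 hsorted).2.1
          have hkk' : k < e.1 := (List.pairwise_cons.1 hp2).1 e.1 h3
          omega
    by_cases hgood : pvRunSuffix e₀.2.1 = true
    · -- A returns e₀'s qual; show B does too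
      have hisdot₀ : PySem.Str.isIn "." e₀.2.1 = true := runSuffix_isIn_dot _ hgood
      have hbnd : ∀ x, pvBoundary c fm = some x → k < x := by
        intro x hx
        have hxmem := PySem.List.min?_mem hx
        unfold pvBares at hxmem
        simp only [List.mem_map, List.mem_filter, Bool.and_eq_true, decide_eq_true_eq,
          Bool.not_eq_eq_eq_not, Bool.not_true] at hxmem
        obtain ⟨e, ⟨he, hc', hdot⟩, hex⟩ := hxmem
        have hk_le : k ≤ e.1 := hminE e he hc' (by rw [hdot]; simp)
        rcases lt_or_eq_of_le hk_le with h | h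
        · omega
        · exfalso
          have hee : e = e₀ := entry_unique hnd he he₀ (by omega)
          rw [hee, hisdot₀] at hdot
          cases hdot
      have hcmem : (k, e₀.2.1) ∈ pvCands c fm := by
        unfold pvCands
        simp only [List.mem_map, List.mem_filter, Bool.and_eq_true, decide_eq_true_eq]
        refine ⟨e₀, ⟨he₀, ⟨by omega, ?_⟩, hgood⟩, by rw [hek₀]⟩
        cases hb : pvBoundary c fm with
        | none => rfl
        | some x => simpa [hek₀] using hbnd x hb
      obtain ⟨m, hm⟩ : ∃ m, PySem.List.min? (pvCands c fm) Prod.fst = some m := by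
        cases h : PySem.List.min? (pvCands c fm) Prod.fst with
        | none =>
          rw [(PySem.List.min?_eq_none_iff _ _).1 h] at hcmem
          cases hcmem
        | some m => exact ⟨m, rfl⟩
      have hmle : m.1 ≤ k := by
        simpa using PySem.List.min?_isMin hm _ hcmem
      have hmmem := PySem.List.min?_mem hm
      unfold pvCands at hmmem
      simp only [List.mem_map, List.mem_filter, Bool.and_eq_true, decide_eq_true_eq] at hmmem
      obtain ⟨e₁, ⟨he₁, ⟨hc₁, _⟩, hgood₁⟩, hme⟩ := hmmem
      have hkle : k ≤ e₁.1 := hminE e₁ he₁ hc₁ (by rw [hgood₁]; rfl)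
      have he₁e₀ : e₁ = e₀ := by
        refine entry_unique hnd he₁ he₀ ?_
        have hm1 : m.1 = e₁.1 := by rw [← hme]
        omega
      simp only [hfe₀, hgood, if_pos, hm, Option.map_some]
      rw [← hme, he₁e₀]
    · -- A stops at a bare name; B's boundary kills every candidate
      have hdot₀ : PySem.Str.isIn "." e₀.2.1 = false := by
        rcases Bool.or_eq_true_iff.1 hPk' with h | h
        · exact absurd h hgood
        · simpa using h
      have hkbares : k ∈ pvBares c fm := by
        unfold pvBares
        simp only [List.mem_map, List.mem_filter, Bool.and_eq_true, decide_eq_true_eq,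
          Bool.not_eq_eq_eq_not, Bool.not_true]
        exact ⟨e₀, ⟨he₀, by omega, hdot₀⟩, hek₀⟩
      obtain ⟨x, hx⟩ : ∃ x, pvBoundary c fm = some x := by
        cases h : pvBoundary c fm with
        | none =>
          unfold pvBoundary at h
          rw [(PySem.List.min?_eq_none_iff _ _).1 h] at hkbares
          cases hkbares
        | some x => exact ⟨x, rfl⟩
      have hxk : x ≤ k := by
        have := PySem.List.min?_isMin hx _ hkbares
        simpa using this
      have hcand : pvCands c fm = [] := by
        unfold pvCands
        have hfil : fm.filter (fun e =>
            decide (c < e.1) &&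
            (match pvBoundary c fm with | none => true | some x => decide (e.1 < x)) &&
            pvRunSuffix e.2.1) = [] := by
          rw [List.filter_eq_nil_iff]
          intro e he
          simp only [hx, Bool.and_eq_true, decide_eq_true_eq, not_and]
          rintro ⟨hc₁, hlt₁⟩ hgood₁
          have := hminE e he hc₁ (by rw [hgood₁]; rfl)
          omega
        rw [hfil, List.map_nil]
      have hmn : PySem.List.min? (pvCands c fm) Prod.fst = none := by
        rw [hcand]
        exact (PySem.List.min?_eq_none_iff _ _).mpr rfl
      simp [hfe₀, hgood, hmn]

-- ===== VERDICT (by name: the statement is the Claim_ definition above) =====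
theorem find_class_run_method_py_spec : Claim_equal_find_class_run_method_py := by
  intro c fm _ hpre
  unfold Spec_find_class_run_method_py
  exact equal_main c fm hpre
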